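-- pv_equiv track=rewrite | github.com/timothelaborie/deeplearningproject | scripts/grid_search.py | dict_to_command
-- ===== SOURCE A (Python) =====
-- def dict_to_command(command_dict):
--     commands = ["sbatch --time 5-0 --ntasks=4 --mem-per-cpu=8G --gpus=rtx_2080_ti:1  --wrap \"PYTHONPATH=/cluster/home/bgunders/deeplearningproject /cluster/scratch/bgunders/conda_envs/sg3exl/bin/python3.9 main.py"]
--     for argument in command_dict:
--         commands = ["{} --{} {}".format(old_command, argument, argument_instance) for old_command in commands for argument_instance in command_dict[argument]]
--     new_commands = []
--     for command in commands:
--         new_commands.append(command + "\"")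
--     return new_commands
-- ===== SOURCE B (Python) =====
-- BASE = "sbatch --time 5-0 --ntasks=4 --mem-per-cpu=8G --gpus=rtx_2080_ti:1  --wrap \"PYTHONPATH=/cluster/home/bgunders/deeplearningproject /cluster/scratch/bgunders/conda_envs/sg3exl/bin/python3.9 main.py"
--
--
-- def _suffixes(items):
--     # suffix strings of all argument combinations, built right-to-left
--     if not items:
--         return [""]
--     (key, values) = items[0]
--     tails = _suffixes(items[1:])
--     return [" --{} {}".format(key, v) + t for v in values for t in tails]
--
--
-- def dict_to_command(command_dict):
--     return [BASE + s + "\"" for s in _suffixes(list(command_dict.items()))]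
-- ===== Notes on version B (the rewrite author's own statement) =====
-- stated objective: simpler
-- what changed: A repeatedly rebuilds the whole command list by expanding full command prefixes left-to-right inside a loop; B recursively builds the per-argument suffix combinations right-to-left and prepends the fixed base once per result.
import Mathlib
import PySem

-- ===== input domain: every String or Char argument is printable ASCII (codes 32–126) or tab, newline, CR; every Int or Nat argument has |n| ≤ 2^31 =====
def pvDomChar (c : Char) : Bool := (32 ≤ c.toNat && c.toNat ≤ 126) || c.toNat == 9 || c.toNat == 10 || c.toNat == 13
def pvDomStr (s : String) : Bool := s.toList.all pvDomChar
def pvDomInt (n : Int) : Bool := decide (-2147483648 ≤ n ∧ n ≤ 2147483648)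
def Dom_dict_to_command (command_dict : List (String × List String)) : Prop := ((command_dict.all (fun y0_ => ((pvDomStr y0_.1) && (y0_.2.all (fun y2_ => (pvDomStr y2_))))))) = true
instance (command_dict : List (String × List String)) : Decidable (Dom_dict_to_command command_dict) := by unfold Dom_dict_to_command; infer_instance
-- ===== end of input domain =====

-- B builds the suffix combinations recursively (right-to-left) instead of A's loop that
-- repeatedly rebuilds the full command-prefix list; objective: simpler decomposition.

def pvBase : String := "sbatch --time 5-0 --ntasks=4 --mem-per-cpu=8G --gpus=rtx_2080_ti:1  --wrap \"PYTHONPATH=/cluster/home/bgunders/deeplearningproject /cluster/scratch/bgunders/conda_envs/sg3exl/bin/python3.9 main.py"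

-- ===== PORT A =====
def dict_to_command (command_dict : List (String × List String)) : List String :=
  let commands :=
    command_dict.foldl
      (fun cmds arg =>
        cmds.flatMap (fun old_command =>
          arg.2.map (fun argument_instance =>
            old_command ++ " --" ++ arg.1 ++ " " ++ argument_instance)))
      [pvBase]
  commands.foldl (fun new_commands command => new_commands ++ [command ++ "\""]) []

-- ===== PORT B =====
def pvSuffixes : List (String × List String) → List String
  | [] => [""]
  | (key, values) :: rest =>
    let tails := pvSuffixes rest
    values.flatMap (fun v => tails.map (fun t => " --" ++ key ++ " " ++ v ++ t))

def dict_to_command_alt (command_dict : List (String × List String)) : List String :=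
  (pvSuffixes command_dict).map (fun s => pvBase ++ s ++ "\"")

-- ===== PRECONDITION & SPEC =====
-- Pre_ excludes association lists with duplicate keys: a Python dict cannot carry them
-- (A's input is a dict), so they lie outside the function's natural domain.
def Pre_dict_to_command (command_dict : List (String × List String)) : Prop :=
  (command_dict.map Prod.fst).Nodup
instance (command_dict : List (String × List String)) : Decidable (Pre_dict_to_command command_dict) := by unfold Pre_dict_to_command; infer_instance

def pvWitness_dict_to_command : (List (String × List String)) :=
  [("lr", ["0.1", "0.01"]), ("bs", ["32"])]

def Spec_dict_to_command (command_dict : List (String × List String)) (out : List String) : Prop := out = dict_to_command_alt command_dict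
instance (command_dict : List (String × List String)) (out : List String) : Decidable (Spec_dict_to_command command_dict out) := by unfold Spec_dict_to_command; infer_instance

-- ===== CLAIM (what is proved, stated in full; the proofs are below) =====
def Claim_equal_dict_to_command : Prop := ∀ (command_dict : List (String × List String)), Dom_dict_to_command command_dict → Pre_dict_to_command command_dict → Spec_dict_to_command command_dict (dict_to_command command_dict)

-- ===== LEMMAS AND PROOFS =====

theorem pv_foldl_push {α : Type} (cs : List α) (acc : List String) (f : α → String) :
    cs.foldl (fun ns c => ns ++ [f c]) acc = acc ++ cs.map f := by
  induction cs generalizing acc with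
  | nil => simp
  | cons c cs ih => simp [ih, List.append_assoc]

theorem pv_foldl_expand (d : List (String × List String)) (L : List String) :
    d.foldl
      (fun cmds arg =>
        cmds.flatMap (fun old =>
          arg.2.map (fun vi => old ++ " --" ++ arg.1 ++ " " ++ vi))) L
    = L.flatMap (fun c => (pvSuffixes d).map (fun s => c ++ s)) := by
  induction d generalizing L with
  | nil => simp [pvSuffixes]
  | cons kv rest ih =>
    obtain ⟨k, vs⟩ := kv
    simp only [List.foldl_cons, ih]
    simp [pvSuffixes, List.flatMap_assoc, List.flatMap_map, List.map_flatMap,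
      List.map_map, Function.comp_def, String.append_assoc]

-- ===== VERDICT (by name: the statement is the Claim_ definition above) =====
theorem dict_to_command_spec : Claim_equal_dict_to_command := by
  intro d _ _
  unfold Spec_dict_to_command dict_to_command dict_to_command_alt
  simp only [pv_foldl_expand, pv_foldl_push, List.nil_append, List.flatMap_cons,
    List.flatMap_nil, List.append_nil, List.map_map]
  apply List.map_congr_left
  intro s _
  simp [String.append_assoc]
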